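-- pv_equiv track=rewrite | github.com/VIJAYASEELAM/anvil | src/anvil/wizard/validators.py | validate_patch_format
-- ===== SOURCE A (Python) =====
-- def validate_patch_format(patch: str) -> list[str]:
--     """Validate git diff patch format."""
--     errors = []
--
--     if not patch.strip():
--         errors.append("Patch is empty")
--         return errors
--
--     lines = patch.split("\n")
--     has_diff_header = any(line.startswith("diff --git") for line in lines)
--     has_file_markers = any(line.startswith("---") or line.startswith("+++") for line in lines)
--     has_hunk_header = any(line.startswith("@@") for line in lines)
--
--     if not (has_diff_header or has_file_markers):
--         errors.append(
--             "Patch does not appear to be valid git diff format. "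
--             "Expected 'diff --git' header or '---/+++' file markers."
--         )
--
--     if not has_hunk_header:
--         errors.append("Patch is missing hunk headers (@@...@@)")
--
--     return errors
-- ===== SOURCE B (Python) =====
-- def validate_patch_format(patch: str) -> list[str]:
--     """Validate git diff patch format via substring search: a line starts with a
--     marker iff "\n"+marker occurs in "\n"+patch (no split into lines at all)."""
--     if not patch.strip():
--         return ["Patch is empty"]
--     s = "\n" + patch
--     errors = []
--     if "\ndiff --git" not in s and "\n---" not in s and "\n+++" not in s:
--         errors.append(
--             "Patch does not appear to be valid git diff format. "
--             "Expected 'diff --git' header or '---/+++' file markers."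
--         )
--     if "\n@@" not in s:
--         errors.append("Patch is missing hunk headers (@@...@@)")
--     return errors
-- ===== Notes on version B (the rewrite author's own statement) =====
-- stated objective: alternative
-- what changed: Instead of splitting the patch into lines and scanning them with startswith, B prepends a newline and decides each flag by one substring-containment test ("\n"+marker in "\n"+patch), so no line list is ever built; correct because a line starts with a newline-free marker iff that marker occurs right after a newline in the sentinel-prefixed text.
import Mathlib
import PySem

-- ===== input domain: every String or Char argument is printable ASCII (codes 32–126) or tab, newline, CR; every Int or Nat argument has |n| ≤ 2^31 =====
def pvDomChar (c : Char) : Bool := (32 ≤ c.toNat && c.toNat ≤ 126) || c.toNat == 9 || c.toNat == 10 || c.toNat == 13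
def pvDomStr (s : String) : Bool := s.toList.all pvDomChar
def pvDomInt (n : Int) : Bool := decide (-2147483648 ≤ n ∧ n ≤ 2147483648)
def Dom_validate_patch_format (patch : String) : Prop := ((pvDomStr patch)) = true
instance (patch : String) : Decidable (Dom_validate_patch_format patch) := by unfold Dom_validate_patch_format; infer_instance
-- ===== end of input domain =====

-- B drops A's split-into-lines entirely: each flag is one substring-containment test
-- ("\n"+marker in "\n"+patch); same error strings, same order (alternative algorithm, same cost).

-- ===== PORT A =====
def validate_patch_format (patch : String) : List String :=
  let errors : List String := []
  if PySem.Str.strip patch = "" then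
    errors ++ ["Patch is empty"]
  else
    let lines : List String := (PySem.Str.split? patch "\n").getD []
    let has_diff_header := lines.any (fun line => PySem.Str.startswith line "diff --git")
    let has_file_markers := lines.any (fun line => PySem.Str.startswith line "---" || PySem.Str.startswith line "+++")
    let has_hunk_header := lines.any (fun line => PySem.Str.startswith line "@@")
    let errors := if !(has_diff_header || has_file_markers) then
        errors ++ ["Patch does not appear to be valid git diff format. Expected 'diff --git' header or '---/+++' file markers."]
      else errors
    let errors := if !has_hunk_header then errors ++ ["Patch is missing hunk headers (@@...@@)"] else errors
    errors

-- ===== PORT B =====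
-- Source B's `s = "\n" + patch` is the char list '\n' :: patch.toList; `sub in s` is PySem.Chars.isIn (exact).
def validate_patch_format_alt (patch : String) : List String :=
  if PySem.Str.strip patch = "" then
    ["Patch is empty"]
  else
    let s : List Char := '\n' :: patch.toList
    let errors : List String := []
    let errors := if !PySem.Chars.isIn "\ndiff --git".toList s
                     && !PySem.Chars.isIn "\n---".toList s
                     && !PySem.Chars.isIn "\n+++".toList s then
        errors ++ ["Patch does not appear to be valid git diff format. Expected 'diff --git' header or '---/+++' file markers."]
      else errors
    let errors := if !PySem.Chars.isIn "\n@@".toList s then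
        errors ++ ["Patch is missing hunk headers (@@...@@)"]
      else errors
    errors

-- ===== PRECONDITION & SPEC =====
def Spec_validate_patch_format (patch : String) (out : List String) : Prop := out = validate_patch_format_alt patch
instance (patch : String) (out : List String) : Decidable (Spec_validate_patch_format patch out) := by unfold Spec_validate_patch_format; infer_instance

-- ===== CLAIM (what is proved, stated in full; the proofs are below) =====
def Claim_equal_validate_patch_format : Prop := ∀ (patch : String), Dom_validate_patch_format patch → Spec_validate_patch_format patch (validate_patch_format patch)

-- ===== LEMMAS AND PROOFS =====

-- reference model of patch.split("\n"): simple structural recursion (cur = reversed current piece)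
def pvSplitNl : List Char → List Char → List (List Char)
  | [], cur => [cur.reverse]
  | c :: t, cur => if c = '\n' then cur.reverse :: pvSplitNl t [] else pvSplitNl t (c :: cur)

theorem pvGo_eq (fuel : Nat) (s cur : List Char) (acc : List (List Char)) (h : s.length ≤ fuel) :
    PySem.Chars.splitOn.go ['\n'] fuel s cur acc = acc.reverse ++ pvSplitNl s cur := by
  induction fuel generalizing s cur acc with
  | zero =>
    have : s = [] := by cases s <;> simp_all
    subst this
    simp [PySem.Chars.splitOn.go, pvSplitNl]
  | succ fuel ih =>
    cases s with
    | nil => simp [PySem.Chars.splitOn.go, pvSplitNl]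
    | cons c rest =>
      rw [PySem.Chars.splitOn.go]
      by_cases hc : c = '\n'
      · subst hc
        simp only [List.isPrefixOf, Bool.and_true]
        rw [ih _ _ _ (by simpa using Nat.le_of_succ_le_succ (by simpa using h))]
        simp [pvSplitNl]
      · have hpf : (['\n'].isPrefixOf (c :: rest)) = false := by
          simp [List.isPrefixOf]; exact fun hh => (hc hh.symm).elim
        rw [if_neg (by simp [hpf])]
        rw [ih _ _ _ (by simpa using h)]
        simp [pvSplitNl, hc]

theorem pvSplitOn_eq (s : List Char) : PySem.Chars.splitOn s ['\n'] = pvSplitNl s [] := by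
  rw [PySem.Chars.splitOn]
  simpa using pvGo_eq (s.length + 1) s [] [] (by omega)

theorem pvSplitNl_cur (t : List Char) : ∀ cur,
    pvSplitNl t cur = (cur.reverse ++ (pvSplitNl t []).headI) :: (pvSplitNl t []).tail := by
  induction t with
  | nil => intro cur; simp [pvSplitNl]
  | cons c t ih =>
    intro cur
    by_cases hc : c = '\n'
    · simp [pvSplitNl, hc]
    · simp only [pvSplitNl, if_neg hc]
      rw [ih (c :: cur), ih [c]]
      simp

-- decomposition of the line list at the first newline
theorem pvSplitNl_dec (t : List Char) :
    ('\n' ∉ t ∧ pvSplitNl t [] = [t]) ∨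
    ∃ a b, t = a ++ '\n' :: b ∧ '\n' ∉ a ∧ pvSplitNl t [] = a :: pvSplitNl b [] := by
  induction t with
  | nil => left; simp [pvSplitNl]
  | cons c t ih =>
    by_cases hc : c = '\n'
    · right; exact ⟨[], t, by simp [hc, pvSplitNl]⟩
    · rcases ih with ⟨h1, h2⟩ | ⟨a, b, hab, ha, hs⟩
      · left
        constructor
        · simp only [List.mem_cons, not_or]
          exact ⟨fun h => hc h.symm, h1⟩
        · simp only [pvSplitNl, if_neg hc]
          rw [pvSplitNl_cur, h2]; simp
      · right
        refine ⟨c :: a, b, by simp [hab], by simp only [List.mem_cons, not_or]; exact ⟨fun h => hc h.symm, ha⟩, ?_⟩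
        simp only [pvSplitNl, if_neg hc]
        rw [pvSplitNl_cur, hs]; simp

-- a newline-free word is a prefix of a ++ '\n'::b iff it is a prefix of a
theorem pvPrefix_nl (p a b : List Char) (hp : '\n' ∉ p) :
    p <+: a ++ '\n' :: b ↔ p <+: a := by
  induction a generalizing p with
  | nil =>
    cases p with
    | nil => simp
    | cons d q =>
      simp only [List.nil_append]
      constructor
      · intro h
        rcases (List.cons_prefix_cons.mp h) with ⟨rfl, -⟩
        exact absurd (List.mem_cons_self) hp
      · intro h; exact absurd h (by simp)
  | cons c a' ih =>
    cases p with
    | nil => simp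
    | cons d q =>
      simp only [List.cons_append, List.cons_prefix_cons]
      exact and_congr_right fun _ => ih q (fun hq => hp (List.mem_cons_of_mem _ hq))

-- '\n'::p occurs in a ++ s (a newline-free) iff it occurs in s
theorem pvInfix_nl (p a : List Char) (s : List Char) (ha : '\n' ∉ a) :
    ('\n' :: p) <:+: a ++ s ↔ ('\n' :: p) <:+: s := by
  induction a with
  | nil => simp
  | cons c a' ih =>
    have hc : c ≠ '\n' := fun h => ha (by simp [h])
    rw [List.cons_append, List.infix_cons_iff]
    constructor
    · rintro (h | h)
      · rcases List.cons_prefix_cons.mp h with ⟨h1, -⟩; exact absurd h1.symm hc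
      · exact (ih (fun hq => ha (List.mem_cons_of_mem _ hq))).mp h
    · intro h; right; exact (ih (fun hq => ha (List.mem_cons_of_mem _ hq))).mpr h

-- KEY: some line of t starts with newline-free p  ↔  '\n'++p occurs in '\n'++t
theorem pvKeyP (t p : List Char) (hp : '\n' ∉ p) :
    (∃ l ∈ pvSplitNl t [], p <+: l) ↔ ('\n' :: p) <:+: ('\n' :: t) := by
  have H : ∀ n t, t.length = n → ((∃ l ∈ pvSplitNl t [], p <+: l) ↔ ('\n' :: p) <:+: ('\n' :: t)) := by
    intro n
    induction n using Nat.strong_induction_on with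
    | _ n ih =>
      intro t ht
      rcases pvSplitNl_dec t with ⟨hnl, hs⟩ | ⟨a, b, rfl, ha, hs⟩
      · rw [hs, List.infix_cons_iff]
        simp only [List.mem_singleton, exists_eq_left]
        constructor
        · intro h; left; exact List.cons_prefix_cons.mpr ⟨rfl, h⟩
        · rintro (h | h)
          · exact (List.cons_prefix_cons.mp h).2
          · exact absurd (h.subset (List.mem_cons_self)) hnl
      · rw [hs]
        have hb : b.length < n := by simp [← ht]; omega
        rw [List.infix_cons_iff]
        simp only [List.mem_cons, exists_eq_or_imp]
        rw [pvInfix_nl p a ('\n' :: b) ha]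
        constructor
        · rintro (h | h)
          · left; exact List.cons_prefix_cons.mpr ⟨rfl, (pvPrefix_nl p a b hp).mpr h⟩
          · right; exact (ih b.length hb b rfl).mp h
        · rintro (h | h)
          · left; exact (pvPrefix_nl p a b hp).mp (List.cons_prefix_cons.mp h).2
          · right; exact (ih b.length hb b rfl).mpr h
  exact H t.length t rfl

theorem pvKey (t p : List Char) (hp : '\n' ∉ p) :
    (pvSplitNl t []).any (fun l => PySem.Chars.startswith l p) =
      PySem.Chars.isIn ('\n' :: p) ('\n' :: t) := by
  rw [Bool.eq_iff_iff]
  simp only [List.any_eq_true, PySem.Chars.startswith_iff, PySem.Chars.isIn_iff_infix]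
  exact pvKeyP t p hp

theorem pvLines_eq (patch : String) :
    (PySem.Str.split? patch "\n").getD [] = (pvSplitNl patch.toList []).map String.ofList := by
  rw [PySem.Str.split?]
  have : ("\n" : String).toList = ['\n'] := rfl
  simp [PySem.Chars.split?, this, pvSplitOn_eq]

theorem pvAnyStr (patch : String) (P : String) (hp : '\n' ∉ P.toList) :
    ((PySem.Str.split? patch "\n").getD []).any (fun line => PySem.Str.startswith line P) =
      PySem.Chars.isIn ('\n' :: P.toList) ('\n' :: patch.toList) := by
  rw [pvLines_eq, ← pvKey patch.toList P.toList hp]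
  simp [List.any_map, Function.comp_def, PySem.Str.startswith_eq, String.toList_ofList]

theorem pvAnyOr (l : List String) (P Q : String) :
    (l.any fun line => PySem.Str.startswith line P || PySem.Str.startswith line Q) =
      ((l.any fun line => PySem.Str.startswith line P) || (l.any fun line => PySem.Str.startswith line Q)) := by
  induction l with
  | nil => rfl
  | cons x xs ih =>
    simp only [PySem.Str.startswith_eq] at ih
    simp only [List.any_cons, PySem.Str.startswith_eq, ih]
    cases PySem.Chars.startswith x.toList P.toList <;>
      cases PySem.Chars.startswith x.toList Q.toList <;> simp

theorem pvMain (patch : String) : validate_patch_format patch = validate_patch_format_alt patch := by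
  unfold validate_patch_format validate_patch_format_alt
  by_cases h : PySem.Str.strip patch = ""
  · simp [h]
  · simp only [h]
    have hd := pvAnyStr patch "diff --git" (by decide)
    have hm1 := pvAnyStr patch "---" (by decide)
    have hm2 := pvAnyStr patch "+++" (by decide)
    have hh := pvAnyStr patch "@@" (by decide)
    have e1 : ("\ndiff --git").toList = '\n' :: ("diff --git").toList := rfl
    have e2 : ("\n---").toList = '\n' :: ("---").toList := rfl
    have e3 : ("\n+++").toList = '\n' :: ("+++").toList := rfl
    have e4 : ("\n@@").toList = '\n' :: ("@@").toList := rfl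
    simp only [pvAnyOr, hd, hm1, hm2, hh, e1, e2, e3, e4, Bool.not_or, Bool.and_assoc]
    simp

-- ===== VERDICT (by name: the statement is the Claim_ definition above) =====
theorem validate_patch_format_spec : Claim_equal_validate_patch_format := by
  intro patch _
  unfold Spec_validate_patch_format
  exact pvMain patch
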